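-- pv_equiv track=rewrite | github.com/srth12/Eclipse-Workspace- | Coding Practice/codingpractice/src/main/python/interview/zalando/Test1.py | solution
-- ===== SOURCE A (Python) =====
-- def remove_unwanted_zeros(S):
--     result = S
--     for element in S:
--         if element is '0':
--             result = result[1:]
--         else:
--             break
--     return result
--
-- def solution(S):
--     # write your code in Python 3.6
--     S = remove_unwanted_zeros(S)
--     if S == '0' or S == '':
--         return 0
--     num_of_steps_to_zero = 0
--
--     while S != '0':
--         if S[-1] == '0':
--             S = S[:-1]
--             num_of_steps_to_zero += 1
--         else:
--             S = S[:-1] + '0'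
--             num_of_steps_to_zero += 1
--
--     return num_of_steps_to_zero
-- ===== SOURCE B (Python) =====
-- def solution(S):
--     t = S.lstrip('0')
--     if not t:
--         return 0
--     return len(t) - 1 + sum(1 for c in t if c != '0')
-- ===== Notes on version B (the rewrite author's own statement) =====
-- stated objective: faster
-- what changed: Replaces the quadratic simulate-the-division loop (slicing the string each step) by a single-pass closed form: strip leading zeros, answer = (len-1) + number of non-'0' characters.
import Mathlib
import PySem

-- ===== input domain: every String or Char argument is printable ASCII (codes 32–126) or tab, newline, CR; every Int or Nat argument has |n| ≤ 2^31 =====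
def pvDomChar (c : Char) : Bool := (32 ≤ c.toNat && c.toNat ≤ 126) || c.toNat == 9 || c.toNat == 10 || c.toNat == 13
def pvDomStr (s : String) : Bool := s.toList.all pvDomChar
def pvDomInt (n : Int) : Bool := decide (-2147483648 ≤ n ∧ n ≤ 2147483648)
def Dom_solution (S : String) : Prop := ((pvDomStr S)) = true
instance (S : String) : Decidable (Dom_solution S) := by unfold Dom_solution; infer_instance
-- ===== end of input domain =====

-- B replaces A's quadratic simulate-each-step loop by a one-pass closed form:
-- strip leading zeros, answer = (length - 1) + number of non-'0' characters.

-- ===== PORT A =====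
-- remove_unwanted_zeros: drops '0's from the front until a non-'0' element is seen (break)
def removeUnwantedZeros : List Char → List Char
  | [] => []
  | c :: rest => if c = '0' then removeUnwantedZeros rest else c :: rest

-- the while loop: while S ≠ "0": drop trailing '0' (one step) or turn trailing non-'0' into '0' (one step).
-- The [] stop case is unreachable from `solution` (the guard returns 0 on the empty string first);
-- Python would raise IndexError there.
def aLoop (l : List Char) (steps : Int) : Int :=
  if l = ['0'] ∨ l = [] then steps
  else
    if l.getLastD ' ' = '0' then aLoop l.dropLast (steps + 1)
    else aLoop (l.dropLast ++ ['0']) (steps + 1)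
termination_by 2 * l.length + (if l.getLastD ' ' = '0' then 0 else 1)
decreasing_by
  · have hne : l ≠ [] := by tauto
    have hpos : 0 < l.length := List.length_pos_iff.mpr hne
    rename_i hcond hlast
    simp only [List.length_dropLast, hlast, if_true]
    split <;> omega
  · rename_i hcond hlast
    have hne : l ≠ [] := by tauto
    have hpos : 0 < l.length := List.length_pos_iff.mpr hne
    rw [if_neg hlast]
    simp
    omega

def solution (S : String) : Int :=
  let t := removeUnwantedZeros S.toList
  if t = ['0'] ∨ t = [] then 0
  else aLoop t 0

-- ===== PORT B =====
def solution_alt (S : String) : Int :=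
  let t := S.toList.dropWhile (· = '0')
  if t = [] then 0
  else ((t.length : Int) - 1) + (t.countP (· ≠ '0') : Int)

-- ===== PRECONDITION & SPEC =====
def Spec_solution (S : String) (out : Int) : Prop := out = solution_alt S
instance (S : String) (out : Int) : Decidable (Spec_solution S out) := by unfold Spec_solution; infer_instance

-- ===== CLAIM (what is proved, stated in full; the proofs are below) =====
def Claim_equal_solution : Prop := ∀ (S : String), Dom_solution S → Spec_solution S (solution S)


-- ===== LEMMAS AND PROOFS =====
theorem removeUnwantedZeros_eq_dropWhile (l : List Char) :
    removeUnwantedZeros l = l.dropWhile (· = '0') := by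
  induction l with
  | nil => rfl
  | cons c rest ih =>
    by_cases h : c = '0' <;> simp [removeUnwantedZeros, List.dropWhile, h, ih]

theorem aLoop_closed (l : List Char) (steps : Int) (h : l ≠ []) :
    aLoop l steps = steps + ((l.length : Int) - 1) + (l.countP (· ≠ '0') : Int) := by
  induction l, steps using aLoop.induct with
  | case1 l steps hstop =>
    rcases hstop with h1 | h1
    · subst h1; rw [aLoop]; simp [List.countP]
    · exact absurd h1 h
  | case2 l steps hstop hlast ih =>
    have hne : l ≠ [] := by tauto
    have hl : l.dropLast ++ [l.getLast hne] = l := List.dropLast_concat_getLast hne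
    have hlast0 : l.getLast hne = '0' := by
      have h2 : (l.dropLast ++ [l.getLast hne]).getLastD ' ' = l.getLast hne :=
        List.getLastD_concat ..
      rw [hl] at h2; rw [← h2, hlast]
    have hdne : l.dropLast ≠ [] := by
      intro hd
      apply hstop; left
      rw [← hl, hd, hlast0]; rfl
    rw [aLoop, if_neg hstop, if_pos hlast, ih hdne]
    have hcount : l.countP (· ≠ '0') = l.dropLast.countP (· ≠ '0') := by
      conv_lhs => rw [← hl]
      rw [List.countP_append]; simp [hlast0]
    have hlen : l.length = l.dropLast.length + 1 := by
      conv_lhs => rw [← hl]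
      simp
    rw [hcount, hlen]
    push_cast
    ring
  | case3 l steps hstop hlast ih =>
    have hne : l ≠ [] := by tauto
    have hl : l.dropLast ++ [l.getLast hne] = l := List.dropLast_concat_getLast hne
    have hlastne : l.getLast hne ≠ '0' := by
      have h2 : (l.dropLast ++ [l.getLast hne]).getLastD ' ' = l.getLast hne :=
        List.getLastD_concat ..
      rw [hl] at h2
      intro hc; apply hlast; rw [h2]; exact hc
    rw [aLoop, if_neg hstop, if_neg hlast, ih (by simp)]
    have hcount : l.countP (· ≠ '0')
        = (l.dropLast ++ ['0']).countP (· ≠ '0') + 1 := by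
      conv_lhs => rw [← hl]
      rw [List.countP_append, List.countP_append]
      simp [hlastne]
    have hlen1 : l.length = l.dropLast.length + 1 := by
      conv_lhs => rw [← hl]
      simp
    have hlen2 : (l.dropLast ++ ['0']).length = l.dropLast.length + 1 := by simp
    rw [hcount, hlen1, hlen2]
    push_cast
    ring

-- ===== VERDICT (by name: the statement is the Claim_ definition above) =====
theorem solution_spec : Claim_equal_solution := by
  intro S _
  unfold Spec_solution solution solution_alt
  rw [removeUnwantedZeros_eq_dropWhile]
  by_cases h1 : S.toList.dropWhile (· = '0') = ['0']
  · exfalso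
    have hne : S.toList.dropWhile (· = '0') ≠ [] := by rw [h1]; simp
    have hh := List.head_dropWhile_not (p := fun c => decide (c = '0')) (l := S.toList) hne
    simp [h1] at hh
  · by_cases h2 : S.toList.dropWhile (· = '0') = []
    · simp [h2]
    · rw [if_neg (by tauto), if_neg h2, aLoop_closed _ 0 h2]
      ring
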